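-- pv_equiv track=rewrite | github.com/RedBlueBird/adventure-bot | util/backpack.py | clear_bp
-- ===== SOURCE A (Python) =====
-- def clear_bp(i):
--     inv_delete = []
--     for x in i:
--         if i[x]["items"] == 0:
--             inv_delete.append(x)
--     for x in inv_delete:
--         del i[x]
--     return i
-- ===== SOURCE B (Python) =====
-- def clear_bp(i):
--     # Fixed-point loop: repeatedly find one key with a zero items count and
--     # delete it, until none is left.  Mutates i in place and returns it.
--     while True:
--         k = next((x for x, v in i.items() if v["items"] == 0), None)
--         if k is None:
--             return i
--         del i[k]
-- ===== Notes on version B (the rewrite author's own statement) =====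
-- stated objective: alternative
-- what changed: Replaces A's single-pass collect-keys-then-delete scheme with a fixed-point loop that repeatedly searches the dict for any one zero-count entry, deletes it, and rescans until no such entry remains (O(n*k) scans instead of one pass).
import Mathlib
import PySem

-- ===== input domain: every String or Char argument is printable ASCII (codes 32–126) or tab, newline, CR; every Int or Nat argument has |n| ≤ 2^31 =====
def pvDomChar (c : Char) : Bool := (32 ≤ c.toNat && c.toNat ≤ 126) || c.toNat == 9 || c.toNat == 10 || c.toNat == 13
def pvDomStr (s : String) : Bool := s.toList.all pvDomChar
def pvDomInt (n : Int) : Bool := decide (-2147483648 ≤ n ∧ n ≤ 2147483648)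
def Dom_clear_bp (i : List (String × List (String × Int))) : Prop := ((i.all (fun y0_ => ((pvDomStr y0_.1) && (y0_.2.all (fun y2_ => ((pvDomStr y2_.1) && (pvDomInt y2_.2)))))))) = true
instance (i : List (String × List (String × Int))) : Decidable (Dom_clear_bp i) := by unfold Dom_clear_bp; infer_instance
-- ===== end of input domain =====

-- B replaces A's one-pass collect-keys-then-delete scheme by a fixed-point loop:
-- find any one zero-count entry, delete it, rescan until none remains.  Return
-- values only (both A and B mutate the argument dict in place, in the same way).

-- ===== PORT A =====
def clear_bp (i : List (String × List (String × Int))) : List (String × List (String × Int)) :=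
  ((i.foldl (fun acc x =>
      if (((PySem.Dict.mk i).get? x.1).bind (fun v => (PySem.Dict.mk v).get? "items")) == some 0
      then acc ++ [x.1] else acc) []).foldl (fun d x => d.erase x) (PySem.Dict.mk i)).items

-- ===== PORT B =====
-- the while-True loop of Source B: find one zero entry, delete it, recurse; stop when none
def clear_bp_altAux (d : PySem.Dict String (List (String × Int))) : List (String × List (String × Int)) :=
  match h : d.items.find? (fun p => (PySem.Dict.mk p.2).get? "items" == some 0) with
  | none => d.items
  | some p => clear_bp_altAux (d.erase p.1)
termination_by d.items.length
decreasing_by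
  have hp := List.mem_of_find?_eq_some h
  simp only [PySem.Dict.erase]
  calc (PySem.Dict.items d |>.filter (fun kv => !(kv.1 == p.1))).length
      < d.items.length := by
        apply List.length_filter_lt_length_iff_exists.mpr
        exact ⟨p, hp, by simp⟩

def clear_bp_alt (i : List (String × List (String × Int))) : List (String × List (String × Int)) :=
  clear_bp_altAux (PySem.Dict.mk i)

-- ===== PRECONDITION & SPEC =====
-- Pre_ excludes (1) association lists with duplicate outer keys — these do not represent
-- a Python dict (the dict collapses them before A runs), and (2) inputs where some value
-- dict lacks the "items" key, on which Python A raises KeyError.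
def Pre_clear_bp (i : List (String × List (String × Int))) : Prop :=
  (i.map Prod.fst).Nodup ∧ ∀ p ∈ i, "items" ∈ p.2.map Prod.fst
instance (i : List (String × List (String × Int))) : Decidable (Pre_clear_bp i) := by
  unfold Pre_clear_bp; infer_instance

def pvWitness_clear_bp : (List (String × List (String × Int))) :=
  [("apple", [("items", 2)]), ("rock", [("items", 0)])]

def Spec_clear_bp (i : List (String × List (String × Int))) (out : List (String × List (String × Int))) : Prop := out = clear_bp_alt i
instance (i : List (String × List (String × Int))) (out : List (String × List (String × Int))) : Decidable (Spec_clear_bp i out) := by unfold Spec_clear_bp; infer_instance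

-- ===== CLAIM (what is proved, stated in full; the proofs are below) =====
def Claim_equal_clear_bp : Prop := ∀ (i : List (String × List (String × Int))), Dom_clear_bp i → Pre_clear_bp i → Spec_clear_bp i (clear_bp i)

-- ===== LEMMAS AND PROOFS =====

theorem items_erase {ν : Type} (d : PySem.Dict String ν) (k : String) :
    (d.erase k).items = d.items.filter (fun p => !(p.1 == k)) := by
  simp [PySem.Dict.erase]

theorem items_foldl_erase {ν : Type} (xs : List String) (d : PySem.Dict String ν) :
    (xs.foldl (fun d x => d.erase x) d).items
      = d.items.filter (fun p => !(xs.contains p.1)) := by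
  induction xs generalizing d with
  | nil => simp
  | cons x xs ih =>
      simp only [List.foldl_cons, ih, items_erase, List.filter_filter]
      apply List.filter_congr
      intro p _
      by_cases h : p.1 = x <;> simp [h]

-- the fixed-point deletion loop of B computes the one-shot filter, given unique keys
theorem altAux_eq_filter (d : PySem.Dict String (List (String × Int)))
    (hnd : (d.items.map Prod.fst).Nodup) :
    clear_bp_altAux d
      = d.items.filter (fun p => !((PySem.Dict.mk p.2).get? "items" == some 0)) := by
  fun_induction clear_bp_altAux d with
  | case1 d h =>
      have hnone := List.find?_eq_none.mp h
      rw [List.filter_eq_self.mpr]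
      intro p hp
      simpa using hnone p hp
  | case2 d p h ih =>
      have hp := List.mem_of_find?_eq_some h
      have hz := List.find?_some h
      have herase := items_erase d p.1
      have hnd' : (((d.erase p.1).items).map Prod.fst).Nodup := by
        rw [herase]
        exact (List.filter_sublist.map Prod.fst).nodup hnd
      rw [ih hnd', herase, List.filter_filter]
      apply List.filter_congr
      intro q hq
      by_cases hzq : ((PySem.Dict.mk q.2).get? "items" == some 0) = true
      · simp [hzq]
      · have hqp : q ≠ p := by intro e; rw [e] at hzq; exact hzq (by simpa using hz)
        have hkey : q.1 ≠ p.1 := fun e =>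
          hqp (List.inj_on_of_nodup_map hnd hq hp e)
        simp [hzq, hkey]

-- ===== VERDICT (by name: the statement is the Claim_ definition above) =====
theorem clear_bp_spec : Claim_equal_clear_bp := by
  intro i _ hpre
  obtain ⟨hnd, _⟩ := hpre
  show clear_bp i = clear_bp_alt i
  unfold clear_bp clear_bp_alt
  rw [PySem.List.foldl_append_if
        (fun x => ((PySem.Dict.mk i).get? x.1).bind (fun v => (PySem.Dict.mk v).get? "items") == some 0)
        Prod.fst i []]
  rw [items_foldl_erase]
  have hitems : (PySem.Dict.mk i).items = i := rfl
  rw [altAux_eq_filter (PySem.Dict.mk i) (by simpa [hitems] using hnd)]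
  rw [hitems, List.nil_append]
  apply List.filter_congr
  intro p hp
  have hget : (PySem.Dict.mk i).get? p.1 = some p.2 := by
    apply PySem.Dict.get?_of_mem_items
    · exact hp
    · simpa [PySem.Dict.keys] using hnd
  have hinj : ∀ q ∈ i, q.1 = p.1 → q = p :=
    fun q hq hqp => List.inj_on_of_nodup_map hnd hq hp hqp
  by_cases hc : (PySem.Dict.mk p.2).get? "items" = some 0
  · have hmem : p.1 ∈ (List.filter (fun x => ((PySem.Dict.mk i).get? x.1).bind (fun v => (PySem.Dict.mk v).get? "items") == some 0) i).map Prod.fst := by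
      refine List.mem_map.mpr ⟨p, List.mem_filter.mpr ⟨hp, ?_⟩, rfl⟩
      simp [hget, hc]
    simp [hc, hmem]
  · have hnmem : p.1 ∉ (List.filter (fun x => ((PySem.Dict.mk i).get? x.1).bind (fun v => (PySem.Dict.mk v).get? "items") == some 0) i).map Prod.fst := by
      intro hmem
      obtain ⟨q, hq, hq1⟩ := List.mem_map.mp hmem
      obtain ⟨hqi, hqc⟩ := List.mem_filter.mp hq
      have := hinj q hqi hq1
      subst this
      rw [hget] at hqc
      simp at hqc
      exact hc (by simpa using hqc)
    simp [hc, hnmem]
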